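-- pv_equiv track=rewrite | github.com/Paul-Int/PodstawyProgramowania | functions/7.19.py | f
-- ===== SOURCE A (Python) =====
-- def f(number):
--     seen = set()
--     total = 0
--
--     for ch in str(number):
--         if ch in seen:
--             total += int(ch)
--         else:
--             seen.add(ch)
--
--     return total
-- ===== SOURCE B (Python) =====
-- def f(number):
--     s = str(number)
--     counts = {}
--     for ch in s:
--         counts[ch] = counts.get(ch, 0) + 1
--     return sum(int(d) * (c - 1) for d, c in counts.items() if c > 1)
-- ===== Notes on version B (the rewrite author's own statement) =====
-- stated objective: simpler
-- what changed: Replaces the per-character seen-set branch with a count-then-aggregate pass: build a frequency dict once, then sum int(d)*(c-1) over entries with c>1, so each character's contribution is computed in closed form from its count.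
import Mathlib
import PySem

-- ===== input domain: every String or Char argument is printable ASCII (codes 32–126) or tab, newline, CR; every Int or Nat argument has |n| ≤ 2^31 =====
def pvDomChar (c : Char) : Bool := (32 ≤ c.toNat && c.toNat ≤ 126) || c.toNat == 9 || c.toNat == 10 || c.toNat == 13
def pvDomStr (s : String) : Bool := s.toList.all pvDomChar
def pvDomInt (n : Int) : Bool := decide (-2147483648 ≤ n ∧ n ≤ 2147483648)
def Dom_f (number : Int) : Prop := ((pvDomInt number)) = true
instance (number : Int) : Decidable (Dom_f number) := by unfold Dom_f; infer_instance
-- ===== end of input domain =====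

-- B replaces A's per-character seen-set branch by a count-then-aggregate pass: build a
-- frequency dict once, then sum int(d)*(c-1) over repeated entries (objective: simpler).

-- int(ch): both Pythons only evaluate it on a repeated character
-- of str(number), which is always a decimal digit ('-' occurs at most once), where
-- PySem.Int.ofChars? is exact and returns some.
def pvIntOfChar (ch : Char) : Int := (PySem.Int.ofChars? [ch]).getD 0

-- ===== PORT A =====
def f (number : Int) : Int :=
  ((PySem.Int.toStr number).toList.foldl
    (fun (st : PySem.Set Char × Int) ch =>
      if PySem.Set.contains st.1 ch then (st.1, st.2 + pvIntOfChar ch)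
      else (PySem.Set.add st.1 ch, st.2))
    (PySem.Set.empty, 0)).2

-- ===== PORT B =====
def f_alt (number : Int) : Int :=
  (((PySem.Int.toStr number).toList.foldl
      (fun (d : PySem.Dict Char Int) ch => d.insert ch (d.getD ch 0 + 1))
      PySem.Dict.empty).items).foldl
    (fun (acc : Int) (p : Char × Int) =>
      if 1 < p.2 then acc + pvIntOfChar p.1 * (p.2 - 1) else acc) 0

-- ===== PRECONDITION & SPEC =====
def Spec_f (number : Int) (out : Int) : Prop := out = f_alt number
instance (number : Int) (out : Int) : Decidable (Spec_f number out) := by unfold Spec_f; infer_instance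

-- ===== CLAIM (what is proved, stated in full; the proofs are below) =====
def Claim_equal_f : Prop := ∀ (number : Int), Dom_f number → Spec_f number (f number)

-- ===== LEMMAS AND PROOFS =====

-- A's loop in closed form: starting from seen set S, the total grows by the value of every
-- character of l, minus the values of the distinct characters newly added to the seen set.
theorem pvLoopA (l : List Char) (S : PySem.Set Char) (t : Int) :
    (l.foldl
      (fun (st : PySem.Set Char × Int) ch =>
        if PySem.Set.contains st.1 ch then (st.1, st.2 + pvIntOfChar ch)
        else (PySem.Set.add st.1 ch, st.2)) (S, t)).2
      = t + (l.map pvIntOfChar).sum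
        - ((PySem.Set.update S l).map pvIntOfChar).sum + ((S.map pvIntOfChar)).sum := by
  induction l generalizing S t with
  | nil => simp [PySem.Set.update]
  | cons c l ih =>
    simp only [List.foldl_cons, List.map_cons, List.sum_cons]
    by_cases h : PySem.Set.contains S c
    · simp only [h, if_true]
      rw [ih]
      have hadd : PySem.Set.add S c = S := by
        simp [PySem.Set.add]
        simpa [PySem.Set.contains] using h
      have hupd : PySem.Set.update S (c :: l) = PySem.Set.update S l := by
        simp [PySem.Set.update, hadd]
      rw [hupd]
      ring
    · simp only [h]
      rw [ih]
      have hadd : PySem.Set.add S c = S ++ [c] := by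
        simp [PySem.Set.add]
        simpa [PySem.Set.contains] using h
      have hupd : PySem.Set.update S (c :: l) = PySem.Set.update (S ++ [c]) l := by
        simp [PySem.Set.update, hadd]
      rw [hupd, hadd]
      simp
      ring

theorem pvSumSub (l : List Char) (g h : Char → Int) :
    (l.map (fun x => g x - h x)).sum = (l.map g).sum - (l.map h).sum := by
  induction l with
  | nil => simp
  | cons c l ih => simp [ih]; ring

-- grouping identity: summing value × multiplicity over the distinct characters is the
-- plain sum of values over the whole list.
theorem pvGroup (l : List Char) :
    ((PySem.Set.ofList l).map (fun k => (l.count k : Int) * pvIntOfChar k)).sum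
      = (l.map pvIntOfChar).sum := by
  have hfin : (PySem.Set.ofList l).toFinset = l.toFinset := by
    ext x; simp [List.mem_toFinset, PySem.Set.mem_ofList]
  rw [Finset.sum_list_map_count l pvIntOfChar]
  rw [← hfin]
  rw [← List.sum_toFinset _ (PySem.Set.nodup_ofList l)]
  apply Finset.sum_congr rfl
  intro x _
  simp [mul_comm]

-- ===== VERDICT (by name: the statement is the Claim_ definition above) =====
theorem f_spec : Claim_equal_f := by
  intro number _
  unfold Spec_f f f_alt
  set l := (PySem.Int.toStr number).toList with hl
  rw [pvLoopA]
  rw [PySem.Dict.foldl_insert_getD_add_one_eq_counter]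
  rw [PySem.Dict.items_counter]
  rw [PySem.List.foldl_congr_mem
      (l := (PySem.Set.ofList l).map (fun k => (k, (l.count k : Int)))) (init := (0 : Int))
      (f := fun (acc : Int) (p : Char × Int) =>
        if 1 < p.2 then acc + pvIntOfChar p.1 * (p.2 - 1) else acc)
      (g := fun (acc : Int) (p : Char × Int) =>
        acc + (if 1 < p.2 then pvIntOfChar p.1 * (p.2 - 1) else 0))
      (by intro acc p _; simp only []; split <;> simp)]
  rw [PySem.List.foldl_add]
  rw [List.map_map]
  have hupd : PySem.Set.update PySem.Set.empty l = PySem.Set.ofList l := by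
    simp [PySem.Set.update, PySem.Set.ofList_eq_foldl, PySem.Set.empty]
  rw [hupd]
  have hmapc : ((PySem.Set.ofList l).map
      ((fun (p : Char × Int) => if 1 < p.2 then pvIntOfChar p.1 * (p.2 - 1) else 0) ∘
        (fun k => (k, (l.count k : Int)))))
      = (PySem.Set.ofList l).map (fun k => (l.count k : Int) * pvIntOfChar k - pvIntOfChar k) := by
    apply List.map_congr_left
    intro k hk
    have hmem : k ∈ l := (PySem.Set.mem_ofList l k).mp hk
    have hpos : 1 ≤ l.count k := List.count_pos_iff.mpr hmem
    simp only [Function.comp]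
    rcases Nat.lt_or_ge 1 (l.count k) with hgt | hle
    · rw [if_pos (by exact_mod_cast hgt)]
      ring
    · have h1 : l.count k = 1 := le_antisymm hle hpos
      rw [if_neg (by simp [h1])]
      simp [h1]
  rw [hmapc, pvSumSub, pvGroup]
  simp [PySem.Set.empty]
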